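-- pv_equiv track=rewrite | github.com/pypi-data/pypi-mirror-213 | packages/zut/zut-0.6.0-py3-none-any.whl/zut/commands.py | get_description_text
-- ===== SOURCE A (Python) =====
-- def get_description_text(docstring: str):
--     if docstring is None:
--         return None
--
--     description = None
--     indent_size = 0
--
--     for line in docstring.splitlines(keepends=False):
--         if description:
--             description += '\n' + line[indent_size:]
--         else:
--             indent_size = 0
--             for char in line:
--                 if char not in [' ', '\t']:
--                     description = line[indent_size:]
--                     break
--                 else:
--                     indent_size += 1
--
--     return description
-- ===== SOURCE B (Python) =====
-- def get_description_text(docstring: str):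
--     if docstring is None:
--         return None
--     lines = docstring.splitlines(keepends=False)
--     for i, line in enumerate(lines):
--         stripped = line.lstrip(' \t')
--         if stripped:
--             indent = len(line) - len(stripped)
--             return '\n'.join([stripped] + [l[indent:] for l in lines[i + 1:]])
--     return None
-- ===== Notes on version B (the rewrite author's own statement) =====
-- stated objective: simpler
-- what changed: Replaces A's stateful fold carrying (description, indent_size) with an inner char-counting loop by a find-the-first-non-blank-line scan followed by a single newline-join of the stripped first line and the blindly indent-sliced later lines.
import Mathlib
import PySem

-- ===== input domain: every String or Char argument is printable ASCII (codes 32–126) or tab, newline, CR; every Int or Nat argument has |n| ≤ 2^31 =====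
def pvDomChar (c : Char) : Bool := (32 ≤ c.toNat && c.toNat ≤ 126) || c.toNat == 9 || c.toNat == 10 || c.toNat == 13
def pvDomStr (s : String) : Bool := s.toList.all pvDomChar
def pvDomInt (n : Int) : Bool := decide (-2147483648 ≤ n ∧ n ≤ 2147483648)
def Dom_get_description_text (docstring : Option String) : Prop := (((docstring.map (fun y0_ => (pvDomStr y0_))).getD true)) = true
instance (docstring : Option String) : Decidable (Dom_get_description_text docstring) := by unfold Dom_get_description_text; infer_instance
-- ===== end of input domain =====

-- B replaces A's stateful accumulator + inner char-counting loop with a find-first-nonblank-then-join decomposition (objective: simpler).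


-- ===== PORT A =====
-- Inner `for char in line:` loop of A: walk `chars`, incrementing indent_size on ' '/'\t',
-- setting description = line[indent_size:] and breaking at the first other char.
def pvAInner (line : List Char) (desc : Option (List Char)) (chars : List Char)
    (indent : Int) : Option (List Char) × Int :=
  match chars with
  | [] => (desc, indent)
  | c :: rest =>
    if ¬ (c = ' ' ∨ c = '\t') then
      (some (PySem.List.slice line (some indent) none), indent)
    else
      pvAInner line desc rest (indent + 1)

-- Outer `for line in docstring.splitlines():` loop of A, carrying (description, indent_size);
-- `if description:` is Python truthiness of an Optional[str] (some non-empty string).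
def pvALoop : List (List Char) → Option (List Char) → Int → Option (List Char) × Int
  | [], desc, indent => (desc, indent)
  | line :: rest, some d, indent =>
    if d ≠ [] then
      pvALoop rest (some (d ++ '\n' :: PySem.List.slice line (some indent) none)) indent
    else
      pvALoop rest (pvAInner line (some d) line 0).1 (pvAInner line (some d) line 0).2
  | line :: rest, none, _indent =>
    pvALoop rest (pvAInner line none line 0).1 (pvAInner line none line 0).2

def get_description_text (docstring : Option String) : Option String :=
  match docstring with
  | none => none
  | some ds =>
    ((pvALoop (PySem.Chars.splitlines ds.toList) none 0).1).map String.ofList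

-- ===== PORT B =====
-- B: find the first line whose lstrip(' \t') is non-empty; join it with the later lines
-- sliced by its indent. `line.lstrip(' \t')` is exactly dropWhile (· ∈ {' ','\t'}) (hand port, exact).
def pvBStrip (line : List Char) : List Char :=
  line.dropWhile (fun c => c = ' ' || c = '\t')

def pvBScan : List (List Char) → Option (List Char)
  | [] => none
  | line :: rest =>
    let stripped := pvBStrip line
    if stripped ≠ [] then
      some (PySem.Chars.join ['\n']
        (stripped :: rest.map (fun l =>
          PySem.List.slice l (some ((line.length - stripped.length : Nat) : Int)) none)))
    else
      pvBScan rest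

def get_description_text_alt (docstring : Option String) : Option String :=
  match docstring with
  | none => none
  | some ds => (pvBScan (PySem.Chars.splitlines ds.toList)).map String.ofList

-- ===== PRECONDITION & SPEC =====
def Spec_get_description_text (docstring : Option String) (out : Option String) : Prop := out = get_description_text_alt docstring
instance (docstring : Option String) (out : Option String) : Decidable (Spec_get_description_text docstring out) := by unfold Spec_get_description_text; infer_instance

-- ===== CLAIM (what is proved, stated in full; the proofs are below) =====
def Claim_equal_get_description_text : Prop := ∀ (docstring : Option String), Dom_get_description_text docstring → Spec_get_description_text docstring (get_description_text docstring)

-- ===== LEMMAS AND PROOFS =====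

-- the inner loop skips exactly the leading ' '/'\t' prefix of the remaining chars
theorem pvAInner_spec (chars : List Char) : ∀ (line : List Char) (desc : Option (List Char)) (indent : Nat),
    line.drop indent = chars →
    pvAInner line desc chars indent =
      if _h : chars.dropWhile (fun c => c = ' ' || c = '\t') = [] then
        (desc, ((indent + chars.length : Nat) : Int))
      else
        (some (chars.dropWhile (fun c => c = ' ' || c = '\t')),
         ((indent + (chars.takeWhile (fun c => c = ' ' || c = '\t')).length : Nat) : Int)) := by
  induction chars with
  | nil => intro line desc indent h; simp [pvAInner]
  | cons c rest ih =>
    intro line desc indent h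
    by_cases hc : c = ' ' ∨ c = '	'
    · have hcb : (decide (c = ' ') || decide (c = '	')) = true := by
        rcases hc with h1 | h1 <;> simp [h1]
      have hrest : line.drop (indent + 1) = rest := by
        rw [← List.tail_drop, h]; rfl
      have iheq := ih line desc (indent + 1) hrest
      simp only [pvAInner]
      rw [if_neg (not_not_intro hc),
        show ((indent : Int) + 1) = ((indent + 1 : Nat) : Int) by push_cast; ring, iheq]
      simp only [List.dropWhile_cons, List.takeWhile_cons, hcb, if_true, List.length_cons]
      split_ifs <;> simp only [Prod.mk.injEq, true_and] <;> push_cast <;> ring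
    · have hcb : (decide (c = ' ') || decide (c = '	')) = false := by
        simp only [Bool.or_eq_false_iff, decide_eq_false_iff_not]; tauto
      have hslice : PySem.List.slice line (some (indent : Int)) none = c :: rest := by
        rw [PySem.List.slice_from_natCast, h]
      simp only [pvAInner]
      rw [if_pos hc]
      simp only [List.dropWhile_cons, List.takeWhile_cons, hcb, Bool.false_eq_true, if_false]
      rw [dif_neg (by simp), hslice]
      simp

theorem pvAInner_blank (line : List Char) (desc : Option (List Char))
    (h : line.dropWhile (fun c => c = ' ' || c = '\t') = []) :
    pvAInner line desc line 0 = (desc, (line.length : Int)) := by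
  have h1 := pvAInner_spec line line desc 0 (by simp)
  rw [dif_pos h] at h1; simpa using h1

theorem pvAInner_found (line : List Char) (desc : Option (List Char))
    (h : line.dropWhile (fun c => c = ' ' || c = '\t') ≠ []) :
    pvAInner line desc line 0 =
      (some (line.dropWhile (fun c => c = ' ' || c = '\t')),
       (((line.takeWhile (fun c => c = ' ' || c = '\t')).length : Nat) : Int)) := by
  have h1 := pvAInner_spec line line desc 0 (by simp)
  rw [dif_neg h] at h1; simpa using h1

-- after description is set (non-empty), A only appends '\n' + line[indent:] per later line
theorem pvALoop_set (rest : List (List Char)) : ∀ (d : List Char) (indent : Int), d ≠ [] →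
    (pvALoop rest (some d) indent).1 =
      some (d ++ rest.flatMap (fun l => '\n' :: PySem.List.slice l (some indent) none)) := by
  induction rest with
  | nil => intro d indent hd; simp [pvALoop]
  | cons l rest ih =>
    intro d indent hd
    simp only [pvALoop, if_pos hd]
    rw [ih _ _ (by simp [hd])]
    simp

-- '\n'.join of a nonempty list is head ++ flatMap ('\n' :: ·) over the tail
theorem join_newline (xs : List (List Char)) : ∀ (x : List Char),
    PySem.Chars.join ['\n'] (x :: xs) = x ++ xs.flatMap (fun l => '\n' :: l) := by
  induction xs with
  | nil => intro x; simp [PySem.Chars.join_singleton]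
  | cons y ys ih => intro x; rw [PySem.Chars.join_cons_cons, ih y]; simp

-- main induction over the lines, while description is still None (A's indent_size is then irrelevant)
theorem main_loop (lines : List (List Char)) :
    ∀ i : Int, (pvALoop lines none i).1 = pvBScan lines := by
  induction lines with
  | nil => intro i; rfl
  | cons line rest ih =>
    intro i
    by_cases hblank : line.dropWhile (fun c => c = ' ' || c = '\t') = []
    · rw [show pvALoop (line :: rest) none i
          = pvALoop rest (pvAInner line none line 0).1 (pvAInner line none line 0).2 from rfl,
        pvAInner_blank line none hblank]
      simp only [pvBScan, pvBStrip, hblank, ne_eq, not_true_eq_false, if_false]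
      exact ih _
    · rw [show pvALoop (line :: rest) none i
          = pvALoop rest (pvAInner line none line 0).1 (pvAInner line none line 0).2 from rfl,
        pvAInner_found line none hblank]
      rw [pvALoop_set rest _ _ hblank]
      simp only [pvBScan, pvBStrip]
      rw [if_pos hblank, join_newline]
      have hlen : (line.takeWhile (fun c => c = ' ' || c = '\t')).length
          = line.length - (line.dropWhile (fun c => c = ' ' || c = '\t')).length := by
        have h2 := congrArg List.length
          (List.takeWhile_append_dropWhile (p := fun c => c = ' ' || c = '\t') (l := line))
        simp only [List.length_append] at h2
        omega
      rw [hlen, List.flatMap_map]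

-- ===== VERDICT (by name: the statement is the Claim_ definition above) =====
theorem get_description_text_spec : Claim_equal_get_description_text := by
  intro docstring _
  unfold Spec_get_description_text
  match docstring with
  | none => rfl
  | some ds =>
    simp only [get_description_text, get_description_text_alt]
    rw [main_loop (PySem.Chars.splitlines ds.toList) 0]
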